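-- pv_equiv track=rewrite | github.com/ashutom/ComponentSegrigator | Comparecsv.py | getKernelStartEndID
-- ===== SOURCE A (Python) =====
-- INVALID_INDEX=-1
--
-- def getKernelStartEndID(line):
-- 	end=INVALID_INDEX
-- 	start=INVALID_INDEX
-- 	end=len(line)-1
-- 	times=0
-- 	while end>=0:
-- 		if line[end]==',':
-- 			times=times+1
-- 		if times==3:
-- 			end=end-1
-- 			break
-- 		end=end-1
--
-- 	if times<3:
-- 		return start,end
--
-- 	start=0
-- 	while start<end:
-- 		if line[start]==',':
-- 			start=start+1
-- 			break
-- 		start=start+1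
-- 	if start>=end or start==0:
-- 		end=start=INVALID_INDEX
--
-- 	return start , end
-- ===== SOURCE B (Python) =====
-- def getKernelStartEndID(line):
--     pos = [i for i, ch in enumerate(line) if ch == ',']
--     if len(pos) < 3:
--         return -1, -1
--     start = pos[0] + 1
--     end = pos[-3] - 1
--     if start >= end:
--         return -1, -1
--     return start, end
-- ===== Notes on version B (the rewrite author's own statement) =====
-- stated objective: simpler
-- what changed: Replaces A's two manual directional while-loop scans (right-to-left comma counter, then left-to-right search) with one pass building the list of all comma positions and indexing it from both ends (pos[0]+1, pos[-3]-1).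
import Mathlib
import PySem

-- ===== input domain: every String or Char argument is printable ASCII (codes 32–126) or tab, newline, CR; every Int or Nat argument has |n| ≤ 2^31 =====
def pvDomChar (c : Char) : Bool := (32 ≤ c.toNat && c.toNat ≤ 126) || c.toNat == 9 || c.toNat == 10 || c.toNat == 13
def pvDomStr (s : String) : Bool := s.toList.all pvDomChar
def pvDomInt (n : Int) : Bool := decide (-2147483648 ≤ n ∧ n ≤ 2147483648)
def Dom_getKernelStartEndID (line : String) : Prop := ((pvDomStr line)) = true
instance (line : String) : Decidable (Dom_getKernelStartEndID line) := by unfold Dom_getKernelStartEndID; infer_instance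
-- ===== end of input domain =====

-- B replaces A's two directional index scans with a single comma-position table indexed
-- from both ends (objective: simpler); return values proved equal on all inputs.

-- ===== PORT A =====
-- first while loop: scan from the right counting commas, stop after the 3rd
def pvLoop1 (cs : List Char) (e times : Int) : Int × Int :=
  if h : 0 ≤ e then
    let times' := if PySem.List.pyGet? cs e = some ',' then times + 1 else times
    if times' = 3 then (times', e - 1)
    else pvLoop1 cs (e - 1) times'
  else (times, e)
termination_by (e + 1).toNat
decreasing_by omega

-- second while loop: scan left to right until just past the first comma
def pvLoop2 (cs : List Char) (start e : Int) : Int :=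
  if h : start < e then
    if PySem.List.pyGet? cs start = some ',' then start + 1
    else pvLoop2 cs (start + 1) e
  else start
termination_by (e - start).toNat
decreasing_by omega

def getKernelStartEndID (line : String) : Int × Int :=
  let cs := line.toList
  let r := pvLoop1 cs ((cs.length : Int) - 1) 0
  if r.1 < 3 then (-1, r.2)
  else
    let s := pvLoop2 cs 0 r.2
    if s ≥ r.2 ∨ s = 0 then (-1, -1) else (s, r.2)

-- ===== PORT B =====
-- pos = [i for i, ch in enumerate(line) if ch == ',']
def pvPos (cs : List Char) (s : Int) : List Int :=
  (PySem.List.enumerate cs s).filterMap (fun p => if p.2 = ',' then some p.1 else none)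

def getKernelStartEndID_alt (line : String) : Int × Int :=
  let pos := pvPos line.toList 0
  if pos.length < 3 then (-1, -1)
  else
    match PySem.List.pyGet? pos 0, PySem.List.pyGet? pos (-3) with
    | some p0, some p3 =>
      let start := p0 + 1
      let e := p3 - 1
      if start ≥ e then (-1, -1) else (start, e)
    | _, _ => (-1, -1)

-- ===== PRECONDITION & SPEC =====
def Spec_getKernelStartEndID (line : String) (out : Int × Int) : Prop := out = getKernelStartEndID_alt line
instance (line : String) (out : Int × Int) : Decidable (Spec_getKernelStartEndID line out) := by unfold Spec_getKernelStartEndID; infer_instance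

-- ===== CLAIM (what is proved, stated in full; the proofs are below) =====
def Claim_equal_getKernelStartEndID : Prop := ∀ (line : String), Dom_getKernelStartEndID line → Spec_getKernelStartEndID line (getKernelStartEndID line)



-- ===== LEMMAS AND PROOFS =====

theorem pvPos_nil (s : Int) : pvPos [] s = [] := by
  simp [pvPos, PySem.List.enumerate_nil]

theorem pvPos_cons (c : Char) (cs : List Char) (s : Int) :
    pvPos (c :: cs) s = (if c = ',' then [s] else []) ++ pvPos cs (s + 1) := by
  by_cases hc : c = ',' <;> simp [pvPos, PySem.List.enumerate_cons, hc]

theorem pvPos_append (xs ys : List Char) (s : Int) :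
    pvPos (xs ++ ys) s = pvPos xs s ++ pvPos ys (s + xs.length) := by
  simp [pvPos, PySem.List.enumerate_append, List.filterMap_append]

theorem mem_pvPos {q : Int} : ∀ (cs : List Char) (s : Int),
    q ∈ pvPos cs s ↔ ∃ k : Nat, cs[k]? = some ',' ∧ q = s + k := by
  intro cs
  induction cs with
  | nil => intro s; simp [pvPos_nil]
  | cons c cs ih =>
    intro s
    rw [pvPos_cons]
    constructor
    · intro hq
      rcases List.mem_append.1 hq with h | h
      · refine ⟨0, ?_, ?_⟩ <;> by_cases hc : c = ',' <;> simp_all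
      · rcases (ih (s + 1)).1 h with ⟨k, hk, hq⟩
        exact ⟨k + 1, by simpa using hk, by push_cast; omega⟩
    · rintro ⟨k, hk, rfl⟩
      match k with
      | 0 =>
        simp at hk
        simp [hk]
      | k + 1 =>
        apply List.mem_append.2
        right
        exact (ih (s + 1)).2 ⟨k, by simpa using hk, by push_cast; omega⟩

theorem pvPos_lb {q : Int} (cs : List Char) (s : Int) (h : q ∈ pvPos cs s) : s ≤ q := by
  rcases (mem_pvPos cs s).1 h with ⟨k, _, rfl⟩
  omega

theorem pvPos_head_min (cs : List Char) (s : Int) :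
    ∀ q ∈ pvPos cs s, (pvPos cs s).getD 0 0 ≤ q := by
  induction cs generalizing s with
  | nil => simp [pvPos_nil]
  | cons c cs ih =>
    intro q hq
    rw [pvPos_cons] at hq ⊢
    by_cases hc : c = ','
    · have hq' : q = s ∨ q ∈ pvPos cs (s + 1) := by simpa [hc] using hq
      have hgd : ((if c = ',' then [s] else []) ++ pvPos cs (s + 1)).getD 0 0 = s := by
        simp [hc]
      rw [hgd]
      rcases hq' with h | h
      · omega
      · have := pvPos_lb cs (s + 1) h
        omega
    · rw [if_neg hc, List.nil_append] at hq ⊢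
      exact ih (s + 1) q hq

-- characterisation of A's first loop: pvLoop1 from index e with counter k returns
-- exactly what B reads off the comma-position table of the prefix cs[0..e]
theorem pvLoop1_spec (cs : List Char) :
    ∀ (m : Nat) (e : Int) (k : Nat), (e + 1).toNat = m → -1 ≤ e → e < cs.length → k ≤ 2 →
      pvLoop1 cs e (k : Int) =
        (let P := pvPos (cs.take (e + 1).toNat) 0
         if 3 ≤ P.length + k then ((3 : Int), P.getD (P.length + k - 3) 0 - 1)
         else ((k : Int) + P.length, -1)) := by
  intro m
  induction m using Nat.strong_induction_on with
  | _ m ih =>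
    intro e k hm he hen hk
    rw [pvLoop1]
    by_cases h0 : 0 ≤ e
    · rw [dif_pos h0]
      have hte : (e + 1).toNat = e.toNat + 1 := by omega
      have hlt : e.toNat < cs.length := by omega
      have htake : cs.take (e + 1).toNat = cs.take e.toNat ++ [cs[e.toNat]] := by
        rw [hte, List.take_add_one]
        simp [List.getElem?_eq_getElem hlt]
      have hlen : (cs.take e.toNat).length = e.toNat := by
        rw [List.length_take]
        omega
      have hget : PySem.List.pyGet? cs e = some cs[e.toNat] := by
        rw [PySem.List.pyGet?_of_nonneg cs h0, List.getElem?_eq_getElem hlt]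
      have hee : (e - 1 + 1).toNat = e.toNat := by omega
      have hP : pvPos (cs.take (e + 1).toNat) 0
          = pvPos (cs.take e.toNat) 0 ++ (if cs[e.toNat] = ',' then [e] else []) := by
        rw [htake, pvPos_append, hlen, pvPos_cons, pvPos_nil, List.append_nil]
        have h01 : ((0 : Int) + (e.toNat : Int)) = e := by omega
        rw [h01]
      by_cases hc : cs[e.toNat] = ','
      · -- comma at e : the counter increments
        rw [if_pos (show PySem.List.pyGet? cs e = some ',' by rw [hget, hc])]
        by_cases hk3 : (k : Int) + 1 = 3
        · have hk2 : k = 2 := by omega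
          subst hk2
          rw [if_pos hk3]
          dsimp only
          rw [hP, if_pos hc]
          rw [if_pos (show 3 ≤ (pvPos (cs.take e.toNat) 0 ++ [e]).length + 2 by simp)]
          have hidx : (pvPos (cs.take e.toNat) 0 ++ [e]).length + 2 - 3
              = (pvPos (cs.take e.toNat) 0).length := by
            simp
          rw [hidx, List.getD_append_right _ _ _ _ (le_refl _), Nat.sub_self]
          norm_num
        · have hcast : (k : Int) + 1 = ((k + 1 : Nat) : Int) := by push_cast; ring
          rw [if_neg hk3, hcast,
              ih (e - 1 + 1).toNat (by omega) (e - 1) (k + 1) rfl (by omega) (by omega)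
                (by omega)]
          dsimp only
          rw [hee, hP, if_pos hc]
          simp only [List.length_append, List.length_singleton]
          by_cases hge : 3 ≤ (pvPos (cs.take e.toNat) 0).length + (k + 1)
          · rw [if_pos hge, if_pos (by omega)]
            have hidx : (pvPos (cs.take e.toNat) 0).length + 1 + k - 3
                = (pvPos (cs.take e.toNat) 0).length + (k + 1) - 3 := by
              omega
            rw [hidx, List.getD_append _ _ _ _ (by omega)]
          · rw [if_neg hge, if_neg (by omega)]
            simp only [Prod.mk.injEq]
            constructor
            · omega
            · trivial
      · -- no comma at e : the counter is unchanged
        rw [if_neg (fun h => hc (Option.some.inj (hget ▸ h))),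
            if_neg (show ¬ ((k : Int)) = 3 by omega),
            ih (e - 1 + 1).toNat (by omega) (e - 1) k rfl (by omega) (by omega) hk]
        dsimp only
        rw [hee, hP, if_neg hc, List.append_nil]
    · rw [dif_neg h0]
      have he1 : e = -1 := by omega
      subst he1
      simp [pvPos_nil]
      omega

-- characterisation of A's second loop: with c0 the least comma index, the scan from s
-- returns c0 + 1 when c0 < e, and otherwise runs up to max s e
theorem pvLoop2_spec (cs : List Char) (c0 e : Int)
    (hc : PySem.List.pyGet? cs c0 = some ',')
    (hmin : ∀ q : Int, 0 ≤ q → PySem.List.pyGet? cs q = some ',' → c0 ≤ q) :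
    ∀ (m : Nat) (s : Int), (e - s).toNat = m → 0 ≤ s → s ≤ c0 →
      pvLoop2 cs s e = if c0 < e then c0 + 1 else max s e := by
  intro m
  induction m using Nat.strong_induction_on with
  | _ m ih =>
    intro s hm hs hsc
    rw [pvLoop2]
    by_cases hlt : s < e
    · rw [dif_pos hlt]
      by_cases hcs : PySem.List.pyGet? cs s = some ','
      · have hcle : c0 ≤ s := hmin s hs hcs
        have hseq : s = c0 := by omega
        rw [if_pos hcs, hseq, if_pos (by omega)]
      · have hne : s ≠ c0 := fun h => hcs (h ▸ hc)
        rw [if_neg hcs,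
            ih (e - (s + 1)).toNat (by omega) (s + 1) rfl (by omega) (by omega)]
        by_cases hce : c0 < e
        · rw [if_pos hce, if_pos hce]
        · rw [if_neg hce, if_neg hce]
          omega
    · rw [dif_neg hlt, if_neg (by omega)]
      omega

-- ===== VERDICT (by name: the statement is the Claim_ definition above) =====
theorem getKernelStartEndID_spec : Claim_equal_getKernelStartEndID := by
  intro line _
  unfold Spec_getKernelStartEndID
  simp only [getKernelStartEndID, getKernelStartEndID_alt]
  set cs := line.toList with hcs
  set pos := pvPos cs 0 with hpos
  have hmain := pvLoop1_spec cs ((cs.length : Int) - 1 + 1).toNat ((cs.length : Int) - 1) 0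
      rfl (by omega) (by omega) (by omega)
  have htakeAll : cs.take ((cs.length : Int) - 1 + 1).toNat = cs := by
    have h : ((cs.length : Int) - 1 + 1).toNat = cs.length := by omega
    rw [h, List.take_length]
  rw [htakeAll, ← hpos] at hmain
  simp only [Nat.cast_zero, add_zero, zero_add] at hmain
  by_cases hL : 3 ≤ pos.length
  · -- at least three commas
    rw [if_pos hL] at hmain
    rw [hmain]
    dsimp only
    rw [if_neg (show ¬ ((3 : Int) < 3) by omega),
        if_neg (show ¬ pos.length < 3 by omega)]
    set c0 := pos.getD 0 0 with hc0
    set p3 := pos.getD (pos.length - 3) 0 with hp3v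
    have hlen0 : 0 < pos.length := by omega
    have hlen3 : pos.length - 3 < pos.length := by omega
    have hp0 : PySem.List.pyGet? pos 0 = some c0 := by
      rw [PySem.List.pyGet?_zero, List.getElem?_eq_getElem hlen0, hc0,
          List.getD_eq_getElem _ _ hlen0]
    have hp3 : PySem.List.pyGet? pos (-3) = some p3 := by
      rw [PySem.List.pyGet?_neg_ofNat pos 3 (by omega) (by omega),
          List.getElem?_eq_getElem hlen3, hp3v, List.getD_eq_getElem _ _ hlen3]
    rw [hp0, hp3]
    dsimp only
    -- facts about the least comma index c0
    have hc0mem : c0 ∈ pos := by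
      rw [hc0, List.getD_eq_getElem _ _ hlen0]
      exact List.getElem_mem _
    have hc0get : PySem.List.pyGet? cs c0 = some ',' := by
      rcases (mem_pvPos cs 0).1 (hpos ▸ hc0mem) with ⟨k, hk, hq⟩
      rw [hq]
      simpa [PySem.List.pyGet?_natCast] using hk
    have hc0nn : (0 : Int) ≤ c0 := pvPos_lb cs 0 (hpos ▸ hc0mem)
    have hc0min : ∀ q : Int, 0 ≤ q → PySem.List.pyGet? cs q = some ',' → c0 ≤ q := by
      intro q hq hqc
      have hqmem : q ∈ pvPos cs 0 := by
        apply (mem_pvPos cs 0).2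
        refine ⟨q.toNat, ?_, by omega⟩
        rw [PySem.List.pyGet?_of_nonneg cs hq] at hqc
        exact hqc
      have hle := pvPos_head_min cs 0 q hqmem
      rw [← hpos, ← hc0] at hle
      exact hle
    rw [pvLoop2_spec cs c0 (p3 - 1) hc0get hc0min ((p3 - 1) - 0).toNat 0 rfl
        (le_refl 0) hc0nn]
    by_cases hce : c0 < p3 - 1
    · rw [if_pos hce]
      by_cases hfin : c0 + 1 ≥ p3 - 1
      · rw [if_pos (Or.inl hfin), if_pos hfin]
      · rw [if_neg (show ¬ (c0 + 1 ≥ p3 - 1 ∨ c0 + 1 = 0) by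
              rintro (h | h) <;> omega),
            if_neg hfin]
    · rw [if_neg hce,
          if_pos (show max 0 (p3 - 1) ≥ p3 - 1 ∨ max 0 (p3 - 1) = 0 by omega),
          if_pos (show c0 + 1 ≥ p3 - 1 by omega)]
  · -- fewer than three commas
    rw [if_neg hL] at hmain
    rw [hmain]
    dsimp only
    rw [if_pos (show ((pos.length : Nat) : Int) < 3 by omega),
        if_pos (show pos.length < 3 by omega)]
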